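-- pv_equiv track=rewrite | github.com/ansonb/RECON | GAT_sep_space/create_batch.py | bfs
-- ===== SOURCE A (Python) =====
-- import queue
--
-- def bfs(graph, source, nbd_size=1):
--     visit = {}
--     distance = {}
--     parent = {}
--     distance_lengths = {}
--
--     visit[source] = 1
--     distance[source] = 0
--     parent[source] = (-1, -1)
--
--     q = queue.Queue()
--     q.put((source, -1))
--
--     while(not q.empty()):
--         top = q.get()
--         if top[0] in graph.keys():
--             for target in graph[top[0]].keys():
--                 if(target in visit.keys()):
--                     continue
--                 else:
--                   distance[target] = distance[top[0]] + 1
--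
--                   if distance[target] > nbd_size:
--                       continue
--
--                   q.put((target, graph[top[0]][target]))
--
--                   visit[target] = 1
--
--                   parent[target] = (top[0], graph[top[0]][target])
--
--                   if distance[target] not in distance_lengths.keys():
--                       distance_lengths[distance[target]] = 1
--
--     neighbors = {}
--     for target in visit.keys():
--         if(distance[target] != nbd_size):
--             continue
--         edges = [-1, parent[target][1]]
--         relations = []
--         entities = [target]
--         temp = target
--         while(parent[temp] != (-1, -1)):
--             relations.append(parent[temp][1])
--             entities.append(parent[temp][0])
--             temp = parent[temp][0]
--
--         if(distance[target] in neighbors.keys()):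
--             neighbors[distance[target]].append(
--                 (tuple(relations), tuple(entities[:-1])))
--         else:
--             neighbors[distance[target]] = [
--                 (tuple(relations), tuple(entities[:-1]))]
--
--     return neighbors
-- ===== SOURCE B (Python) =====
-- def bfs(graph, source, nbd_size=1):
--     neighbors = {}
--     if nbd_size >= 0:
--         found = []
--         visited = {source}
--         todo = [(source, 0, (), ())]
--         i = 0
--         while i < len(todo):
--             node, depth, rels, ents = todo[i]
--             i += 1
--             if depth == nbd_size:
--                 found.append((rels, ents))
--             else:
--                 for tgt, rel in graph.get(node, {}).items():
--                     if tgt not in visited: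
--                         visited.add(tgt)
--                         todo.append((tgt, depth + 1, (rel,) + rels, (tgt,) + ents))
--         if found:
--             neighbors[nbd_size] = found
--     return neighbors
-- ===== Notes on version B (the rewrite author's own statement) =====
-- stated objective: alternative
-- what changed: B replaces A's parent-pointer BFS (queue.Queue, four dicts, and a per-result backward walk reconstructing each path) by a single plain-list worklist that carries each node's (relations, entities) path with it and collects distance-nbd_size paths as they are dequeued; Pre_ excludes graphs whose node -1 has an edge with relation -1 to another node, where A's (-1,-1) 'no parent' sentinel collides with real edge data (ids in this codebase never include -1).
-- outside the precondition, e.g. on bfs({-1: {3: -1}}, -1, 1): A returns {1: [((), ())]}, B returns {1: [((-1,), (3,))]}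
import Mathlib
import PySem

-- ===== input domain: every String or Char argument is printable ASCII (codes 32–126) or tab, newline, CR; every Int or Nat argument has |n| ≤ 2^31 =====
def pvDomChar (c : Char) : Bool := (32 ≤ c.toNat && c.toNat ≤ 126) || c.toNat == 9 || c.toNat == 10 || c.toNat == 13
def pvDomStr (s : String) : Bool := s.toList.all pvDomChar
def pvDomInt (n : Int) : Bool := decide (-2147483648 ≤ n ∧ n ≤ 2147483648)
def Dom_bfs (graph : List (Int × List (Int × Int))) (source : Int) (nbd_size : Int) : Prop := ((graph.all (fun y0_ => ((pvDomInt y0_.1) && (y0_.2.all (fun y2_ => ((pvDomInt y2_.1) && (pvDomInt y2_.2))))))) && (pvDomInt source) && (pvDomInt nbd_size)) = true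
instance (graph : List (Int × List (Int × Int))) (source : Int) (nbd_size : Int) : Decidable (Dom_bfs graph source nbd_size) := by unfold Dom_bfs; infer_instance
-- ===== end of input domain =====

-- B carries each node's path in the worklist instead of A's parent-pointer dicts + backward
-- reconstruction walk (and a plain list instead of queue.Queue): same values on Pre_, different structure.

-- total number of edge pairs in the graph; used as the (provably sufficient) fuel of both loop ports
def pvPairs (graph : List (Int × List (Int × Int))) : Nat :=
  (graph.map (fun kv => kv.2.length)).sum

-- ===== PORT A =====
-- the `while parent[temp] != (-1,-1)` reconstruction walk of A's final loop
def bfsWalk (parent : PySem.Dict Int (Int × Int)) :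
    Nat → Int → List Int → List Int → List Int × List Int
  | 0, _, relations, entities => (relations, entities)
  | fuel + 1, temp, relations, entities =>
    match parent.get? temp with
    | none => (relations, entities)  -- unreachable: every visited node has a parent entry
    | some pr =>
      if pr = (-1, -1) then (relations, entities)
      else bfsWalk parent fuel pr.1 (relations ++ [pr.2]) (entities ++ [pr.1])

-- the `for target in graph[top[0]].keys()` body; r is graph[top[0]][target] (inner dict keys are unique)
def bfsScan (nbd_size top : Int) :
    List (Int × Int) → PySem.Dict Int Int → PySem.Dict Int Int → PySem.Dict Int (Int × Int) →
      PySem.Dict Int Int → List (Int × Int) →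
    PySem.Dict Int Int × PySem.Dict Int Int × PySem.Dict Int (Int × Int) × PySem.Dict Int Int × List (Int × Int)
  | [], visit, distance, parent, dl, q => (visit, distance, parent, dl, q)
  | (target, rel) :: rest, visit, distance, parent, dl, q =>
    if visit.contains target then
      bfsScan nbd_size top rest visit distance parent dl q
    else
      -- distance[target] = distance[top[0]] + 1  (top[0] is always a distance key)
      let d := distance.getD top 0 + 1
      if d > nbd_size then
        bfsScan nbd_size top rest visit (distance.insert target d) parent dl q
      else
        bfsScan nbd_size top rest (visit.insert target 1) (distance.insert target d)
          (parent.insert target (top, rel))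
          (if dl.contains d then dl else dl.insert d 1) (q ++ [(target, rel)])

-- the `while not q.empty()` loop (fuel-bounded; pvPairs graph + 2 provably empties the queue)
def bfsLoop (graph : PySem.Dict Int (List (Int × Int))) (nbd_size : Int) :
    Nat → PySem.Dict Int Int → PySem.Dict Int Int → PySem.Dict Int (Int × Int) →
      PySem.Dict Int Int → List (Int × Int) →
    PySem.Dict Int Int × PySem.Dict Int Int × PySem.Dict Int (Int × Int) × PySem.Dict Int Int × List (Int × Int)
  | 0, visit, distance, parent, dl, q => (visit, distance, parent, dl, q)
  | fuel + 1, visit, distance, parent, dl, q =>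
    match q with
    | [] => (visit, distance, parent, dl, [])
    | top :: q' =>
      match graph.get? top.1 with
      | none => bfsLoop graph nbd_size fuel visit distance parent dl q'
      | some adj =>
        let s := bfsScan nbd_size top.1 adj visit distance parent dl q'
        bfsLoop graph nbd_size fuel s.1 s.2.1 s.2.2.1 s.2.2.2.1 s.2.2.2.2

-- the final `for target in visit.keys()` loop (the dead local `edges` of A is not materialised)
def bfsCollect (nbd_size : Int) (distance : PySem.Dict Int Int) (parent : PySem.Dict Int (Int × Int))
    (wf : Nat) :
    List Int → PySem.Dict Int (List (List Int × List Int)) → PySem.Dict Int (List (List Int × List Int))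
  | [], nb => nb
  | t :: rest, nb =>
    if distance.getD t 0 ≠ nbd_size then bfsCollect nbd_size distance parent wf rest nb
    else
      let w := bfsWalk parent wf t [] [t]
      let path := (w.1, w.2.dropLast)
      let d := distance.getD t 0
      match nb.get? d with
      | some lst => bfsCollect nbd_size distance parent wf rest (nb.insert d (lst ++ [path]))
      | none => bfsCollect nbd_size distance parent wf rest (nb.insert d [path])

def bfs (graph : List (Int × List (Int × Int))) (source : Int) (nbd_size : Int) :
    List (Int × List (List Int × List Int)) :=
  let g := PySem.Dict.mk graph
  let visit := (PySem.Dict.empty (κ := Int) (ν := Int)).insert source 1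
  let distance := (PySem.Dict.empty (κ := Int) (ν := Int)).insert source 0
  let parent := (PySem.Dict.empty (κ := Int) (ν := Int × Int)).insert source (-1, -1)
  let s := bfsLoop g nbd_size (pvPairs graph + 2) visit distance parent PySem.Dict.empty [(source, -1)]
  (bfsCollect nbd_size s.2.1 s.2.2.1 (pvPairs graph + 1) s.1.keys PySem.Dict.empty).items

-- ===== PORT B =====
-- the inner `for tgt, rel in graph.get(node, {}).items()` of Source B
def bfsAltScan (depth : Int) (rels ents : List Int) :
    List (Int × Int) → PySem.Set Int → List (Int × Int × List Int × List Int) →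
    PySem.Set Int × List (Int × Int × List Int × List Int)
  | [], visited, todo => (visited, todo)
  | (tgt, rel) :: rest, visited, todo =>
    if PySem.Set.contains visited tgt then bfsAltScan depth rels ents rest visited todo
    else bfsAltScan depth rels ents rest (PySem.Set.add visited tgt)
      (todo ++ [(tgt, depth + 1, rel :: rels, tgt :: ents)])

-- the `while i < len(todo)` worklist of Source B (fuel-bounded; pvPairs graph + 2 provably drains it)
def bfsAltLoop (graph : PySem.Dict Int (List (Int × Int))) (nbd_size : Int) :
    Nat → PySem.Set Int → List (Int × Int × List Int × List Int) → List (List Int × List Int) →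
    List (List Int × List Int)
  | 0, _, _, found => found
  | fuel + 1, visited, todo, found =>
    match todo with
    | [] => found
    | (node, depth, rels, ents) :: rest =>
      if depth = nbd_size then bfsAltLoop graph nbd_size fuel visited rest (found ++ [(rels, ents)])
      else
        let s := bfsAltScan depth rels ents ((graph.get? node).getD []) visited rest
        bfsAltLoop graph nbd_size fuel s.1 s.2 found

def bfs_alt (graph : List (Int × List (Int × Int))) (source : Int) (nbd_size : Int) :
    List (Int × List (List Int × List Int)) :=
  if nbd_size < 0 then []
  else
    let found := bfsAltLoop (PySem.Dict.mk graph) nbd_size (pvPairs graph + 2)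
      (PySem.Set.add PySem.Set.empty source) [(source, 0, [], [])] []
    if found = [] then [] else [(nbd_size, found)]

-- ===== PRECONDITION & SPEC =====
-- Pre_ excludes graphs whose node -1 has an outgoing edge with relation -1 to another node: -1 is A's
-- out-of-band "no parent" sentinel (ids in this codebase never include it), and on such graphs A's
-- sentinel collides with real edge data and the recorded paths are truncated.
def Pre_bfs (graph : List (Int × List (Int × Int))) (source : Int) (nbd_size : Int) : Prop :=
  ∀ p ∈ (((PySem.Dict.mk graph).get? (-1)).getD []), ¬(p.2 = -1 ∧ p.1 ≠ -1)
instance (graph : List (Int × List (Int × Int))) (source : Int) (nbd_size : Int) : Decidable (Pre_bfs graph source nbd_size) := by unfold Pre_bfs; infer_instance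

def pvWitness_bfs : (List (Int × List (Int × Int))) × Int × Int := ([(0, [(1, 5)]), (1, [(2, 7)])], 0, 2)

def Spec_bfs (graph : List (Int × List (Int × Int))) (source : Int) (nbd_size : Int) (out : List (Int × List (List Int × List Int))) : Prop := out = bfs_alt graph source nbd_size
instance (graph : List (Int × List (Int × Int))) (source : Int) (nbd_size : Int) (out : List (Int × List (List Int × List Int))) : Decidable (Spec_bfs graph source nbd_size out) := by unfold Spec_bfs; infer_instance

-- ===== CLAIM (what is proved, stated in full; the proofs are below) =====
def Claim_equal_bfs : Prop := ∀ (graph : List (Int × List (Int × Int))) (source : Int) (nbd_size : Int), Dom_bfs graph source nbd_size → Pre_bfs graph source nbd_size → Spec_bfs graph source nbd_size (bfs graph source nbd_size)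

-- ===== LEMMAS AND PROOFS =====

-- all edge targets of the graph, with multiplicity
def pvTargets (graph : List (Int × List (Int × Int))) : List Int :=
  graph.flatMap (fun kv => kv.2.map Prod.fst)

def pvNode (e : Int × Int × List Int × List Int) : Int := e.1
def pvDepth (e : Int × Int × List Int × List Int) : Int := e.2.1
def pvRels (e : Int × Int × List Int × List Int) : List Int := e.2.2.1
def pvEnts (e : Int × Int × List Int × List Int) : List Int := e.2.2.2

-- the parent-pointer chain of A: node n reaches source with relation list rels and full entity list full
inductive PathOf (parent : PySem.Dict Int (Int × Int)) (source : Int) : Int → List Int → List Int → Prop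
  | base : parent.get? source = some (-1, -1) → PathOf parent source source [] [source]
  | step {p r n rels full} : PathOf parent source p rels full →
      parent.get? n = some (p, r) → (p, r) ≠ (-1, -1) →
      PathOf parent source n (r :: rels) (n :: full)

lemma PathOf.head {parent source n rels full} (h : PathOf parent source n rels full) :
    ∃ t, full = n :: t := by
  cases h with
  | base _ => exact ⟨[], rfl⟩
  | step _ _ _ => exact ⟨_, rfl⟩

lemma PathOf.len {parent source n rels full} (h : PathOf parent source n rels full) :
    full.length = rels.length + 1 := by
  induction h with
  | base _ => simp
  | step _ _ _ ih => simpa using ih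

lemma PathOf.walk {parent source n rels full} (h : PathOf parent source n rels full) :
    ∀ fuel, rels.length < fuel → ∀ aR aE,
      bfsWalk parent fuel n aR aE = (aR ++ rels, aE ++ full.tail) := by
  induction h with
  | base hs =>
    intro fuel hf aR aE
    match fuel, hf with
    | fuel + 1, _ => simp [bfsWalk, hs]
  | @step p r n rels full hp hn hne ih =>
    intro fuel hf aR aE
    match fuel, hf with
    | fuel + 1, hf =>
      have hfl : rels.length < fuel := by simpa using hf
      obtain ⟨t, ht⟩ := hp.head
      simp only [bfsWalk, hn, if_neg hne]
      rw [ih fuel hfl]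
      simp [ht]

lemma PathOf.preserve {parent source n rels full} (h : PathOf parent source n rels full)
    {t : Int} (ht : t ∉ full) (v : Int × Int) :
    PathOf (parent.insert t v) source n rels full := by
  induction h with
  | base hs =>
    have hst : source ≠ t := by simp at ht; exact fun h => ht h.symm
    exact PathOf.base (by rw [PySem.Dict.get?_insert_of_ne _ _ hst]; exact hs)
  | @step p r n rels full hp hn hne ih =>
    have htn : n ≠ t := fun h => ht (h ▸ List.mem_cons_self)
    have htf : t ∉ full := fun h => ht (List.mem_cons_of_mem _ h)
    exact PathOf.step (ih htf) (by rw [PySem.Dict.get?_insert_of_ne _ _ htn]; exact hn) hne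

-- the joint invariant tying A's state (visit, distance, parent, q) to B's (visited, todo) with
-- ghost list P of already-processed records; Q := P ++ todo lists all visited nodes with their data
structure BfsInv (graph : List (Int × List (Int × Int))) (source nbd : Int)
    (visit distance : PySem.Dict Int Int) (parent : PySem.Dict Int (Int × Int))
    (q : List (Int × Int)) (visited : PySem.Set Int)
    (todo P : List (Int × Int × List Int × List Int)) : Prop where
  hq : q.map Prod.fst = todo.map pvNode
  hkeys : visit.keys = (P ++ todo).map pvNode
  hvisited : visited = (P ++ todo).map pvNode
  hnodup : ((P ++ todo).map pvNode).Nodup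
  hdist : ∀ e ∈ P ++ todo, distance.get? (pvNode e) = some (pvDepth e)
  hdepth : ∀ e ∈ P ++ todo, 0 ≤ pvDepth e ∧ pvDepth e ≤ nbd
  hzero : ∀ e ∈ P ++ todo, pvDepth e = 0 → pvNode e = source
  hpath : ∀ e ∈ P ++ todo, PathOf parent source (pvNode e) (pvRels e) (pvEnts e ++ [source])
  hchain : ∀ e ∈ P ++ todo, ∀ x ∈ pvEnts e ++ [source], x ∈ (P ++ todo).map pvNode
  hchainnd : ∀ e ∈ P ++ todo, (pvEnts e ++ [source]).Nodup
  hsub : ∀ x ∈ (P ++ todo).map pvNode, x = source ∨ x ∈ pvTargets graph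

def pvMeas (graph : List (Int × List (Int × Int))) (q : List (Int × Int)) (nodes : List Int) : Nat :=
  q.length + ((pvTargets graph).toFinset \ nodes.toFinset).card

lemma contains_of_inv {graph source nbd visit distance parent q visited todo P}
    (hinv : BfsInv graph source nbd visit distance parent q visited todo P) (x : Int) :
    visit.contains x = true ↔ x ∈ (P ++ todo).map pvNode := by
  rw [PySem.Dict.contains_iff_mem_keys, hinv.hkeys]

-- A's inner scan when distance[top]+1 > nbd_size: only junk distance entries on unvisited nodes
lemma scanJunk (nbd top : Int) :
    ∀ (adj : List (Int × Int)) visit distance parent dl q,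
    distance.getD top 0 + 1 > nbd →
    (∃ dtop, distance.get? top = some dtop) →
    visit.contains top = true →
    ∃ D', bfsScan nbd top adj visit distance parent dl q = (visit, D', parent, dl, q) ∧
      ∀ n, visit.contains n = true → D'.get? n = distance.get? n := by
  intro adj
  induction adj with
  | nil => intro visit distance parent dl q _ _ _; exact ⟨distance, rfl, fun n _ => rfl⟩
  | cons pr rest ih =>
    intro visit distance parent dl q hgt hsome htop
    obtain ⟨target, rel⟩ := pr
    by_cases hv : visit.contains target = true
    · rw [bfsScan, if_pos hv]
      exact ih visit distance parent dl q hgt hsome htop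
    · rw [bfsScan, if_neg hv]
      simp only [if_pos hgt]
      have hne : ∀ n, visit.contains n = true → n ≠ target := by
        intro n hn h; rw [h] at hn; exact hv hn
      have hpres : ∀ n, visit.contains n = true →
          (distance.insert target (distance.getD top 0 + 1)).get? n = distance.get? n :=
        fun n hn => PySem.Dict.get?_insert_of_ne _ _ (hne n hn)
      have hgt' : (distance.insert target (distance.getD top 0 + 1)).getD top 0 + 1 > nbd := by
        rw [PySem.Dict.getD_eq_get?_getD, hpres top htop, ← PySem.Dict.getD_eq_get?_getD]
        exact hgt
      obtain ⟨D', hD, hDpres⟩ := ih visit (distance.insert target (distance.getD top 0 + 1))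
        parent dl q hgt' ⟨hsome.choose, by rw [hpres top htop]; exact hsome.choose_spec⟩ htop
      exact ⟨D', hD, fun n hn => by rw [hDpres n hn, hpres n hn]⟩

-- target of any edge reached through a successful lookup is in pvTargets
lemma target_mem_pvTargets {graph : List (Int × List (Int × Int))} {node target rel : Int}
    (h : (target, rel) ∈ (((PySem.Dict.mk graph).get? node).getD [])) :
    target ∈ pvTargets graph := by
  cases hg : (PySem.Dict.mk graph).get? node with
  | none => rw [hg] at h; simp at h
  | some adj0 =>
    rw [hg] at h
    have hmem : (node, adj0) ∈ graph := PySem.Dict.mem_items_of_get?_eq_some _ hg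
    simp only [pvTargets, List.mem_flatMap]
    exact ⟨(node, adj0), hmem, List.mem_map.mpr ⟨(target, rel), h, rfl⟩⟩

-- one synchronous pass over an adjacency list: A's bfsScan and B's bfsAltScan preserve the invariant
lemma scan_sim (graph : List (Int × List (Int × Int))) (source nbd : Int)
    (hPre : Pre_bfs graph source nbd) :
    ∀ (adj : List (Int × Int)) visit distance parent dl q visited todo P
      (e : Int × Int × List Int × List Int),
    BfsInv graph source nbd visit distance parent q visited todo P →
    e ∈ P → pvDepth e + 1 ≤ nbd →
    (∀ pr ∈ adj, pr ∈ (((PySem.Dict.mk graph).get? (pvNode e)).getD [])) →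
    ∃ visit' distance' parent' dl' q' visited' todo',
      bfsScan nbd (pvNode e) adj visit distance parent dl q = (visit', distance', parent', dl', q') ∧
      bfsAltScan (pvDepth e) (pvRels e) (pvEnts e) adj visited todo = (visited', todo') ∧
      BfsInv graph source nbd visit' distance' parent' q' visited' todo' P ∧
      pvMeas graph q' ((P ++ todo').map pvNode) ≤ pvMeas graph q ((P ++ todo).map pvNode) := by
  intro adj
  induction adj with
  | nil =>
    intro visit distance parent dl q visited todo P e hinv _ _ _
    exact ⟨visit, distance, parent, dl, q, visited, todo, rfl, rfl, hinv, le_refl _⟩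
  | cons pr rest ih =>
    intro visit distance parent dl q visited todo P e hinv he hdlt hadj
    obtain ⟨target, rel⟩ := pr
    have heQ : e ∈ P ++ todo := List.mem_append_left _ he
    have hnodeQ : pvNode e ∈ (P ++ todo).map pvNode := List.mem_map.mpr ⟨e, heQ, rfl⟩
    by_cases hv : visit.contains target = true
    · -- already visited: both sides skip
      have hvB : PySem.Set.contains visited target = true := by
        rw [hinv.hvisited]
        simpa using (contains_of_inv hinv target).mp hv
      rw [bfsScan, if_pos hv]
      obtain ⟨v', d', p', dl', q', vis', todo', hA, hB, hI, hM⟩ :=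
        ih visit distance parent dl q visited todo P e hinv he hdlt
          (fun pr hpr => hadj pr (List.mem_cons_of_mem _ hpr))
      exact ⟨v', d', p', dl', q', vis', todo', hA, by rw [bfsAltScan, if_pos hvB]; exact hB, hI, hM⟩
    · -- fresh target: A enqueues/visits/records parent, B enqueues the extended path
      have htN : target ∉ (P ++ todo).map pvNode := fun h => hv ((contains_of_inv hinv target).mpr h)
      have hvB : ¬ PySem.Set.contains visited target = true := by
        rw [hinv.hvisited]; simpa using htN
      have hdtop : distance.get? (pvNode e) = some (pvDepth e) := hinv.hdist e heQ
      have hgetD : distance.getD (pvNode e) 0 = pvDepth e := by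
        rw [PySem.Dict.getD_eq_get?_getD, hdtop]; rfl
      have hsent : (pvNode e, rel) ≠ (-1, -1) := by
        intro hbad
        have hn1 : pvNode e = -1 := congrArg Prod.fst hbad
        have hr1 : rel = -1 := congrArg Prod.snd hbad
        have htmem := hadj (target, rel) List.mem_cons_self
        rw [hn1] at htmem
        have ht1 : target ≠ -1 := fun h => htN (h ▸ hn1 ▸ hnodeQ)
        exact hPre (target, rel) htmem ⟨hr1, ht1⟩
      have htT : target ∈ pvTargets graph :=
        target_mem_pvTargets (hadj (target, rel) List.mem_cons_self)
      set en : Int × Int × List Int × List Int :=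
        (target, pvDepth e + 1, rel :: pvRels e, target :: pvEnts e) with hen
      have hd0 : (0:Int) ≤ pvDepth e := (hinv.hdepth e heQ).1
      have hvfalse : visit.contains target = false := by simpa using hv
      have hassoc : P ++ (todo ++ [en]) = (P ++ todo) ++ [en] := (List.append_assoc _ _ _).symm
      have hmapQ' : (P ++ (todo ++ [en])).map pvNode = (P ++ todo).map pvNode ++ [target] := by
        rw [hassoc, List.map_append]; rfl
      -- the new joint invariant
      have hinv' : BfsInv graph source nbd (visit.insert target 1)
          (distance.insert target (pvDepth e + 1)) (parent.insert target (pvNode e, rel))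
          (q ++ [(target, rel)]) (PySem.Set.add visited target) (todo ++ [en]) P := by
        refine ⟨?_, ?_, ?_, ?_, ?_, ?_, ?_, ?_, ?_, ?_, ?_⟩
        · simp only [List.map_append, hinv.hq]; rfl
        · rw [PySem.Dict.keys_insert_of_not_contains _ _ hvfalse, hinv.hkeys, hmapQ']
        · rw [PySem.Set.add_of_not_mem (by rw [hinv.hvisited]; exact htN), hinv.hvisited, hmapQ']
        · rw [hmapQ']
          refine List.Nodup.append hinv.hnodup (List.nodup_singleton _) ?_
          intro a ha hat
          have : a = target := by simpa using hat
          exact htN (this ▸ ha)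
        · intro e' he'
          rw [hassoc] at he'
          rcases List.mem_append.mp he' with hold | hnew
          · have hne : pvNode e' ≠ target := fun h => htN (h ▸ List.mem_map.mpr ⟨e', hold, rfl⟩)
            rw [PySem.Dict.get?_insert_of_ne _ _ hne]; exact hinv.hdist e' hold
          · have : e' = en := by simpa using hnew
            subst this
            exact PySem.Dict.get?_insert_self distance target _
        · intro e' he'
          rw [hassoc] at he'
          rcases List.mem_append.mp he' with hold | hnew
          · exact hinv.hdepth e' hold
          · have : e' = en := by simpa using hnew
            subst this
            exact ⟨by show (0:Int) ≤ pvDepth e + 1; omega, by show pvDepth e + 1 ≤ nbd; omega⟩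
        · intro e' he' hz
          rw [hassoc] at he'
          rcases List.mem_append.mp he' with hold | hnew
          · exact hinv.hzero e' hold hz
          · have : e' = en := by simpa using hnew
            subst this
            exfalso
            have hz' : pvDepth e + 1 = 0 := hz
            omega
        · intro e' he'
          rw [hassoc] at he'
          rcases List.mem_append.mp he' with hold | hnew
          · refine (hinv.hpath e' hold).preserve ?_ _
            intro hmem
            exact htN (hinv.hchain e' hold target hmem)
          · have : e' = en := by simpa using hnew
            subst this
            have hbase : PathOf (parent.insert target (pvNode e, rel)) source (pvNode e)
                (pvRels e) (pvEnts e ++ [source]) := by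
              refine (hinv.hpath e heQ).preserve ?_ _
              intro hmem
              exact htN (hinv.hchain e heQ target hmem)
            exact PathOf.step hbase (PySem.Dict.get?_insert_self parent target _) hsent
        · intro e' he' x hx
          rw [hassoc] at he'
          rw [hmapQ']
          rcases List.mem_append.mp he' with hold | hnew
          · exact List.mem_append_left _ (hinv.hchain e' hold x hx)
          · have : e' = en := by simpa using hnew
            subst this
            have hx' : x ∈ target :: (pvEnts e ++ [source]) := hx
            rcases List.mem_cons.mp hx' with rfl | hx2
            · simp
            · exact List.mem_append_left _ (hinv.hchain e heQ x hx2)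
        · intro e' he'
          rw [hassoc] at he'
          rcases List.mem_append.mp he' with hold | hnew
          · exact hinv.hchainnd e' hold
          · have : e' = en := by simpa using hnew
            subst this
            show (target :: (pvEnts e ++ [source])).Nodup
            exact List.nodup_cons.mpr
              ⟨fun h => htN (hinv.hchain e heQ target h), hinv.hchainnd e heQ⟩
        · intro x hx
          rw [hmapQ'] at hx
          rcases List.mem_append.mp hx with hold | hnew
          · exact hinv.hsub x hold
          · have : x = target := by simpa using hnew
            subst this
            right; exact htT
      -- measure is unchanged by this step
      have hmeas : pvMeas graph (q ++ [(target, rel)]) ((P ++ (todo ++ [en])).map pvNode)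
          = pvMeas graph q ((P ++ todo).map pvNode) := by
        rw [hmapQ']
        simp only [pvMeas, List.length_append, List.length_cons, List.length_nil]
        have hins : ((P ++ todo).map pvNode ++ [target]).toFinset
            = insert target ((P ++ todo).map pvNode).toFinset := by
          simp [List.toFinset_append]
        rw [hins, Finset.sdiff_insert]
        have hmemdiff : target ∈ (pvTargets graph).toFinset \ ((P ++ todo).map pvNode).toFinset := by
          rw [Finset.mem_sdiff]
          exact ⟨List.mem_toFinset.mpr htT, fun h => htN (List.mem_toFinset.mp h)⟩
        rw [Finset.card_erase_of_mem hmemdiff]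
        have hpos : 1 ≤ ((pvTargets graph).toFinset \ ((P ++ todo).map pvNode).toFinset).card :=
          Finset.card_pos.mpr ⟨target, hmemdiff⟩
        omega
      -- step both programs and recurse
      rw [bfsScan, if_neg hv]
      simp only [hgetD, if_neg (by omega : ¬ (pvDepth e + 1 > nbd))]
      obtain ⟨v', d', p', dl', q', vis', todo', hA, hB, hI, hM⟩ :=
        ih (visit.insert target 1) (distance.insert target (pvDepth e + 1))
          (parent.insert target (pvNode e, rel))
          (if (PySem.Dict.contains dl (pvDepth e + 1)) then dl else dl.insert (pvDepth e + 1) 1)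
          (q ++ [(target, rel)]) (PySem.Set.add visited target) (todo ++ [en]) P e hinv' he hdlt
          (fun pr hpr => hadj pr (List.mem_cons_of_mem _ hpr))
      refine ⟨v', d', p', dl', q', vis', todo', hA, ?_, hI, le_trans hM (le_of_eq hmeas)⟩
      rw [bfsAltScan, if_neg hvB]
      exact hB

-- B's eventual output list for the processed records P
def pvOut (nbd : Int) (P : List (Int × Int × List Int × List Int)) : List (List Int × List Int) :=
  (P.filter (fun e => pvDepth e == nbd)).map (fun e => (pvRels e, pvEnts e))

lemma pvOut_append_singleton (nbd : Int) (P : List (Int × Int × List Int × List Int)) (e) :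
    pvOut nbd (P ++ [e]) =
      pvOut nbd P ++ (if pvDepth e = nbd then [(pvRels e, pvEnts e)] else []) := by
  simp only [pvOut, List.filter_append, List.map_append]
  by_cases h : pvDepth e = nbd <;> simp [h]

lemma pvTargets_length (graph : List (Int × List (Int × Int))) :
    (pvTargets graph).length = pvPairs graph := by
  simp [pvTargets, pvPairs, List.length_flatMap]

-- bound on the reconstruction-walk fuel: every chain is a list of distinct visited nodes
lemma relsLen_lt {graph source nbd visit distance parent q visited todo P}
    (hinv : BfsInv graph source nbd visit distance parent q visited todo P)
    {e} (he : e ∈ P ++ todo) : (pvRels e).length < pvPairs graph + 1 := by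
  have hsubch : (pvEnts e ++ [source]) ⊆ source :: pvTargets graph := by
    intro x hx
    rcases hinv.hsub x (hinv.hchain e he x hx) with rfl | h
    · exact List.mem_cons_self
    · exact List.mem_cons_of_mem _ h
  have hlen := (List.subperm_of_subset (hinv.hchainnd e he) hsubch).length_le
  have hfl := (hinv.hpath e he).len
  have hT := pvTargets_length graph
  simp only [List.length_append, List.length_cons, List.length_nil] at hlen hfl
  omega

-- evaluation of A's final collection loop over the processed records
lemma collect_acc (graph : List (Int × List (Int × Int))) (source nbd : Int)
    (distance : PySem.Dict Int Int) (parent : PySem.Dict Int (Int × Int)) :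
    ∀ (P : List (Int × Int × List Int × List Int)) (acc : List (List Int × List Int)),
    (∀ e ∈ P, distance.get? (pvNode e) = some (pvDepth e) ∧
      PathOf parent source (pvNode e) (pvRels e) (pvEnts e ++ [source]) ∧
      (pvRels e).length < pvPairs graph + 1) →
    bfsCollect nbd distance parent (pvPairs graph + 1) (P.map pvNode)
        (PySem.Dict.mk [(nbd, acc)]) =
      PySem.Dict.mk [(nbd, acc ++ pvOut nbd P)] := by
  intro P
  induction P with
  | nil => intro acc _; simp [bfsCollect, pvOut]
  | cons e P ih =>
    intro acc hpt
    obtain ⟨hd, hp, hwf⟩ := hpt e List.mem_cons_self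
    have hrest := fun e' he' => hpt e' (List.mem_cons_of_mem _ he')
    have hgetD : distance.getD (pvNode e) 0 = pvDepth e := by
      rw [PySem.Dict.getD_eq_get?_getD, hd]; rfl
    simp only [List.map_cons, bfsCollect, hgetD]
    by_cases hdep : pvDepth e = nbd
    · rw [if_neg (by simp [hdep])]
      obtain ⟨t, ht⟩ := hp.head
      have hwalk := hp.walk (pvPairs graph + 1) hwf [] [pvNode e]
      have htail : [pvNode e] ++ (pvEnts e ++ [source]).tail = pvEnts e ++ [source] := by
        rw [ht]; rfl
      rw [htail] at hwalk
      have hget : (PySem.Dict.mk [(nbd, acc)]).get? (pvDepth e) = some acc := by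
        rw [hdep]; simp [PySem.Dict.get?_mk_cons]
      simp only [hwalk, hget, List.nil_append, List.dropLast_concat]
      have hins : (PySem.Dict.mk [(nbd, acc)]).insert (pvDepth e)
          (acc ++ [(pvRels e, pvEnts e)]) = PySem.Dict.mk [(nbd, acc ++ [(pvRels e, pvEnts e)])] := by
        apply PySem.Dict.ext
        rw [PySem.Dict.items_insert_of_contains]
        · simp [hdep]
        · rw [hdep]; simp [PySem.Dict.contains_mk]
      rw [hins, ih _ hrest]
      have hout : pvOut nbd (e :: P) = (pvRels e, pvEnts e) :: pvOut nbd P := by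
        simp only [pvOut, List.filter_cons]
        rw [if_pos (by simpa using hdep)]
        rfl
      rw [hout]
      simp
    · rw [if_pos (by simpa using hdep)]
      rw [ih _ hrest]
      have : pvOut nbd (e :: P) = pvOut nbd P := by
        simp only [pvOut, List.filter_cons]
        rw [if_neg (by simpa using hdep)]
      rw [this]

lemma collect_start (graph : List (Int × List (Int × Int))) (source nbd : Int)
    (distance : PySem.Dict Int Int) (parent : PySem.Dict Int (Int × Int)) :
    ∀ (P : List (Int × Int × List Int × List Int)),
    (∀ e ∈ P, distance.get? (pvNode e) = some (pvDepth e) ∧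
      PathOf parent source (pvNode e) (pvRels e) (pvEnts e ++ [source]) ∧
      (pvRels e).length < pvPairs graph + 1) →
    (bfsCollect nbd distance parent (pvPairs graph + 1) (P.map pvNode) PySem.Dict.empty).items =
      (if pvOut nbd P = [] then [] else [(nbd, pvOut nbd P)]) := by
  intro P
  induction P with
  | nil => intro _; simp [bfsCollect, pvOut, PySem.Dict.empty]
  | cons e P ih =>
    intro hpt
    obtain ⟨hd, hp, hwf⟩ := hpt e List.mem_cons_self
    have hrest := fun e' he' => hpt e' (List.mem_cons_of_mem _ he')
    have hgetD : distance.getD (pvNode e) 0 = pvDepth e := by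
      rw [PySem.Dict.getD_eq_get?_getD, hd]; rfl
    simp only [List.map_cons, bfsCollect, hgetD]
    by_cases hdep : pvDepth e = nbd
    · rw [if_neg (by simp [hdep])]
      obtain ⟨t, ht⟩ := hp.head
      have hwalk := hp.walk (pvPairs graph + 1) hwf [] [pvNode e]
      have htail : [pvNode e] ++ (pvEnts e ++ [source]).tail = pvEnts e ++ [source] := by
        rw [ht]; rfl
      rw [htail] at hwalk
      have hget : (PySem.Dict.empty (κ := Int) (ν := List (List Int × List Int))).get? (pvDepth e)
          = none := PySem.Dict.get?_empty _
      simp only [hwalk, hget, List.nil_append, List.dropLast_concat]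
      have hins : (PySem.Dict.empty (κ := Int) (ν := List (List Int × List Int))).insert (pvDepth e)
          [(pvRels e, pvEnts e)] = PySem.Dict.mk [(nbd, [(pvRels e, pvEnts e)])] := by
        apply PySem.Dict.ext
        rw [PySem.Dict.items_insert_of_not_contains]
        · simp [PySem.Dict.empty, hdep]
        · simp [PySem.Dict.contains_empty]
      rw [hins, collect_acc graph source nbd distance parent P _ hrest]
      have hout : pvOut nbd (e :: P) = (pvRels e, pvEnts e) :: pvOut nbd P := by
        simp only [pvOut, List.filter_cons]
        rw [if_pos (by simpa using hdep)]
        rfl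
      rw [hout]
      simp
    · rw [if_pos (by simpa using hdep)]
      rw [ih hrest]
      have : pvOut nbd (e :: P) = pvOut nbd P := by
        simp only [pvOut, List.filter_cons]
        rw [if_neg (by simpa using hdep)]
      rw [this]

-- popping the front record from the queues keeps the invariant (the record moves into P)
lemma inv_pop {graph : List (Int × List (Int × Int))} {source nbd : Int}
    {visit distance parent visited} {top : Int × Int} {q' : List (Int × Int)}
    {e : Int × Int × List Int × List Int} {rest P}
    (hinv : BfsInv graph source nbd visit distance parent (top :: q') visited (e :: rest) P) :
    BfsInv graph source nbd visit distance parent q' visited rest (P ++ [e]) := by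
  have hQ : (P ++ [e]) ++ rest = P ++ e :: rest := by simp
  have hq' : q'.map Prod.fst = rest.map pvNode := by
    have := hinv.hq
    simp only [List.map_cons, List.cons_eq_cons] at this
    exact this.2
  exact ⟨hq', by rw [hQ]; exact hinv.hkeys, by rw [hQ]; exact hinv.hvisited,
    by rw [hQ]; exact hinv.hnodup, by rw [hQ]; exact hinv.hdist, by rw [hQ]; exact hinv.hdepth,
    by rw [hQ]; exact hinv.hzero, by rw [hQ]; exact hinv.hpath, by rw [hQ]; exact hinv.hchain,
    by rw [hQ]; exact hinv.hchainnd, by rw [hQ]; exact hinv.hsub⟩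

-- replacing distance by one that agrees on all visited nodes keeps the invariant
lemma inv_distpres {graph : List (Int × List (Int × Int))} {source nbd : Int}
    {visit distance D' parent q visited todo P}
    (hinv : BfsInv graph source nbd visit distance parent q visited todo P)
    (hpres : ∀ n, visit.contains n = true → D'.get? n = distance.get? n) :
    BfsInv graph source nbd visit D' parent q visited todo P := by
  refine ⟨hinv.hq, hinv.hkeys, hinv.hvisited, hinv.hnodup, ?_, hinv.hdepth, hinv.hzero,
    hinv.hpath, hinv.hchain, hinv.hchainnd, hinv.hsub⟩
  intro e he
  rw [hpres (pvNode e) ((contains_of_inv hinv (pvNode e)).mpr (List.mem_map.mpr ⟨e, he, rfl⟩))]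
  exact hinv.hdist e he

-- the pointwise facts bfsCollect needs, extracted from the invariant
lemma inv_collect_facts {graph : List (Int × List (Int × Int))} {source nbd : Int}
    {visit distance parent q visited todo P}
    (hinv : BfsInv graph source nbd visit distance parent q visited todo P) :
    ∀ e ∈ P, distance.get? (pvNode e) = some (pvDepth e) ∧
      PathOf parent source (pvNode e) (pvRels e) (pvEnts e ++ [source]) ∧
      (pvRels e).length < pvPairs graph + 1 := by
  intro e he
  have heQ : e ∈ P ++ todo := List.mem_append_left _ he
  exact ⟨hinv.hdist e heQ, hinv.hpath e heQ, relsLen_lt hinv heQ⟩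

-- the main lockstep simulation: A's queue loop + final collection = B's worklist loop (wrapped)
lemma loop_sim (graph : List (Int × List (Int × Int))) (source nbd : Int)
    (hPre : Pre_bfs graph source nbd) :
    ∀ (fuel : Nat) visit distance parent dl q visited todo P,
    BfsInv graph source nbd visit distance parent q visited todo P →
    pvMeas graph q ((P ++ todo).map pvNode) ≤ fuel →
    (bfsCollect nbd (bfsLoop (PySem.Dict.mk graph) nbd fuel visit distance parent dl q).2.1
        (bfsLoop (PySem.Dict.mk graph) nbd fuel visit distance parent dl q).2.2.1
        (pvPairs graph + 1)
        (bfsLoop (PySem.Dict.mk graph) nbd fuel visit distance parent dl q).1.keys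
        PySem.Dict.empty).items =
      (if bfsAltLoop (PySem.Dict.mk graph) nbd fuel visited todo (pvOut nbd P) = [] then []
       else [(nbd, bfsAltLoop (PySem.Dict.mk graph) nbd fuel visited todo (pvOut nbd P))]) := by
  intro fuel
  induction fuel with
  | zero =>
    intro visit distance parent dl q visited todo P hinv hM
    have hq0 : q = [] := by
      have : q.length = 0 := by
        have := hM
        simp only [pvMeas, Nat.le_zero] at this
        omega
      exact List.eq_nil_of_length_eq_zero this
    have htodo0 : todo = [] := by
      have := hinv.hq
      rw [hq0] at this
      have := congrArg List.length this
      simpa using (List.eq_nil_of_length_eq_zero (by simpa using this.symm))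
    subst hq0; subst htodo0
    simp only [bfsLoop, bfsAltLoop]
    have hkeys := hinv.hkeys
    simp only [List.append_nil] at hkeys
    rw [hkeys]
    exact collect_start graph source nbd distance parent P (inv_collect_facts hinv)
  | succ f ih =>
    intro visit distance parent dl q visited todo P hinv hM
    cases q with
    | nil =>
      have htodo0 : todo = [] := by
        have := hinv.hq
        have := congrArg List.length this
        simpa using (List.eq_nil_of_length_eq_zero (by simpa using this.symm))
      subst htodo0
      simp only [bfsLoop, bfsAltLoop]
      have hkeys := hinv.hkeys
      simp only [List.append_nil] at hkeys
      rw [hkeys]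
      exact collect_start graph source nbd distance parent P (inv_collect_facts hinv)
    | cons top q' =>
      cases todo with
      | nil =>
        exfalso
        have := hinv.hq
        simp at this
      | cons e rest =>
        obtain ⟨n1, d1, r1, e1⟩ := e
        obtain ⟨t1, t2⟩ := top
        have htop : n1 = t1 := by
          have := hinv.hq
          simp only [List.map_cons, List.cons_eq_cons] at this
          exact this.1.symm
        subst htop
        have hinv2 := inv_pop hinv
        have heP : (n1, d1, r1, e1) ∈ P ++ [(n1, d1, r1, e1)] := List.mem_append_right _ List.mem_cons_self
        have heQ2 : (n1, d1, r1, e1) ∈ (P ++ [(n1, d1, r1, e1)]) ++ rest := List.mem_append_left _ heP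
        have hd1 : distance.get? n1 = some d1 := hinv2.hdist _ heQ2
        have hgetD1 : distance.getD n1 0 = d1 := by rw [PySem.Dict.getD_eq_get?_getD, hd1]; rfl
        have hdepth1 := hinv2.hdepth _ heQ2
        have hcont1 : visit.contains n1 = true :=
          (contains_of_inv hinv2 n1).mpr (List.mem_map.mpr ⟨_, heQ2, rfl⟩)
        have hMpop : pvMeas graph q' (((P ++ [(n1, d1, r1, e1)]) ++ rest).map pvNode) ≤ f := by
          have : (P ++ [(n1, d1, r1, e1)]) ++ rest = P ++ (n1, d1, r1, e1) :: rest := by simp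
          rw [this]
          simp only [pvMeas, List.length_cons] at hM ⊢
          omega
        by_cases hdep : d1 = nbd
        · -- depth = nbd_size: A's scan only writes junk distance entries, B records the path
          have hout' : pvOut nbd (P ++ [(n1, d1, r1, e1)]) = pvOut nbd P ++ [(r1, e1)] := by
            rw [pvOut_append_singleton]
            rw [if_pos (show pvDepth (n1, d1, r1, e1) = nbd from hdep)]
            rfl
          have hBstep : bfsAltLoop (PySem.Dict.mk graph) nbd (f + 1) visited
              ((n1, d1, r1, e1) :: rest) (pvOut nbd P) =
              bfsAltLoop (PySem.Dict.mk graph) nbd f visited rest (pvOut nbd (P ++ [(n1, d1, r1, e1)])) := by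
            rw [bfsAltLoop, if_pos hdep, hout']
          rw [hBstep]
          cases hg : (PySem.Dict.mk graph).get? n1 with
          | none =>
            rw [show bfsLoop (PySem.Dict.mk graph) nbd (f + 1) visit distance parent dl
                ((n1, t2) :: q') = bfsLoop (PySem.Dict.mk graph) nbd f visit distance parent dl q'
              from by simp only [bfsLoop, hg]]
            exact ih visit distance parent dl q' visited rest _ hinv2 hMpop
          | some adj =>
            obtain ⟨D', hscan, hpres⟩ := scanJunk nbd n1 adj visit distance parent dl q'
              (by rw [hgetD1]; omega) ⟨d1, hd1⟩ hcont1
            rw [show bfsLoop (PySem.Dict.mk graph) nbd (f + 1) visit distance parent dl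
                ((n1, t2) :: q') = bfsLoop (PySem.Dict.mk graph) nbd f visit D' parent dl q'
              from by simp only [bfsLoop, hg, hscan]]
            exact ih visit D' parent dl q' visited rest _ (inv_distpres hinv2 hpres) hMpop
        · -- depth < nbd_size: both sides expand the adjacency list in lockstep
          have hlt : d1 + 1 ≤ nbd := by
            have h1 : (0:Int) ≤ pvDepth (n1, d1, r1, e1) := hdepth1.1
            have h2 : pvDepth (n1, d1, r1, e1) ≤ nbd := hdepth1.2
            simp only [pvDepth] at h1 h2
            rcases lt_or_eq_of_le h2 with h | h
            · omega
            · exact absurd h hdep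
          cases hg : (PySem.Dict.mk graph).get? n1 with
          | none =>
            have hBstep : bfsAltLoop (PySem.Dict.mk graph) nbd (f + 1) visited
                ((n1, d1, r1, e1) :: rest) (pvOut nbd P) =
                bfsAltLoop (PySem.Dict.mk graph) nbd f visited rest (pvOut nbd (P ++ [(n1, d1, r1, e1)])) := by
              rw [bfsAltLoop, if_neg hdep, hg]
              rw [pvOut_append_singleton, if_neg (show ¬ pvDepth (n1, d1, r1, e1) = nbd from hdep)]
              simp [bfsAltScan]
            rw [hBstep]
            rw [show bfsLoop (PySem.Dict.mk graph) nbd (f + 1) visit distance parent dl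
                ((n1, t2) :: q') = bfsLoop (PySem.Dict.mk graph) nbd f visit distance parent dl q'
              from by simp only [bfsLoop, hg]]
            exact ih visit distance parent dl q' visited rest _ hinv2 hMpop
          | some adj =>
            obtain ⟨v', d', p', dl', q2, vis', todo', hA, hB, hI, hMs⟩ :=
              scan_sim graph source nbd hPre adj visit distance parent dl q' visited rest
                (P ++ [(n1, d1, r1, e1)]) (n1, d1, r1, e1) hinv2 heP hlt
                (fun pr hpr => by show pr ∈ ((PySem.Dict.mk graph).get? n1).getD []; rw [hg]; exact hpr)
            have hBstep : bfsAltLoop (PySem.Dict.mk graph) nbd (f + 1) visited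
                ((n1, d1, r1, e1) :: rest) (pvOut nbd P) =
                bfsAltLoop (PySem.Dict.mk graph) nbd f vis' todo' (pvOut nbd (P ++ [(n1, d1, r1, e1)])) := by
              rw [bfsAltLoop, if_neg hdep, hg]
              rw [pvOut_append_singleton, if_neg (show ¬ pvDepth (n1, d1, r1, e1) = nbd from hdep)]
              simp only [List.append_nil]
              have hB' : bfsAltScan d1 r1 e1 adj visited rest = (vis', todo') := hB
              rw [show ((some adj).getD [] : List (Int × Int)) = adj from rfl, hB']
            rw [hBstep]
            rw [show bfsLoop (PySem.Dict.mk graph) nbd (f + 1) visit distance parent dl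
                ((n1, t2) :: q') = bfsLoop (PySem.Dict.mk graph) nbd f v' d' p' dl' q2
              from by
                have hA' : bfsScan nbd n1 adj visit distance parent dl q' = (v', d', p', dl', q2) := hA
                simp only [bfsLoop, hg, hA']]
            exact ih v' d' p' dl' q2 vis' todo' _ hI (le_trans hMs hMpop)

-- ===== VERDICT (by name: the statement is the Claim_ definition above) =====
theorem bfs_spec : Claim_equal_bfs := by
  intro graph source nbd hdom hpre
  unfold Spec_bfs
  by_cases hneg : nbd < 0
  · -- negative nbd_size: A visits only the source (all neighbours exceed the bound), outputs {}
    simp only [bfs_alt, if_pos hneg]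
    have hfu : pvPairs graph + 2 = (pvPairs graph + 1) + 1 := rfl
    have hgd0 : ((PySem.Dict.empty (κ := Int) (ν := Int)).insert source 0).getD source 0 = 0 := by
      rw [PySem.Dict.getD_eq_get?_getD, PySem.Dict.get?_insert_self]; rfl
    have hcont0 : ((PySem.Dict.empty (κ := Int) (ν := Int)).insert source 1).contains source
        = true := PySem.Dict.contains_insert_self _ _ _
    cases hg : (PySem.Dict.mk graph).get? source with
    | none =>
      simp only [bfs, bfsLoop, hg]
      have hkeys : ((PySem.Dict.empty (κ := Int) (ν := Int)).insert source 1).keys = [source] := by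
        rw [PySem.Dict.keys_insert_of_not_contains _ _ (PySem.Dict.contains_empty _)]
        simp [PySem.Dict.keys_empty]
      simp only [hkeys, bfsCollect]
      rw [if_pos (by rw [hgd0]; omega)]
      simp [PySem.Dict.empty]
    | some adj =>
      obtain ⟨D', hscan, hpres⟩ := scanJunk nbd source adj
        ((PySem.Dict.empty (κ := Int) (ν := Int)).insert source 1)
        ((PySem.Dict.empty (κ := Int) (ν := Int)).insert source 0)
        ((PySem.Dict.empty (κ := Int) (ν := Int × Int)).insert source (-1, -1))
        PySem.Dict.empty []
        (by rw [hgd0]; omega) ⟨0, PySem.Dict.get?_insert_self _ _ _⟩ hcont0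
      simp only [bfs, bfsLoop, hg, hscan]
      have hkeys : ((PySem.Dict.empty (κ := Int) (ν := Int)).insert source 1).keys = [source] := by
        rw [PySem.Dict.keys_insert_of_not_contains _ _ (PySem.Dict.contains_empty _)]
        simp [PySem.Dict.keys_empty]
      simp only [hkeys, bfsCollect]
      have hD : D'.getD source 0 = 0 := by
        rw [PySem.Dict.getD_eq_get?_getD, hpres source hcont0, PySem.Dict.get?_insert_self]; rfl
      rw [if_pos (by rw [hD]; omega)]
      simp [PySem.Dict.empty]
  · -- main case: the lockstep simulation from the initial states
    have h0 : (0:Int) ≤ nbd := not_lt.mp hneg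
    have hinv0 : BfsInv graph source nbd
        ((PySem.Dict.empty (κ := Int) (ν := Int)).insert source 1)
        ((PySem.Dict.empty (κ := Int) (ν := Int)).insert source 0)
        ((PySem.Dict.empty (κ := Int) (ν := Int × Int)).insert source (-1, -1))
        [(source, -1)] (PySem.Set.add PySem.Set.empty source)
        [(source, 0, [], [])] [] := by
      refine ⟨rfl, ?_, ?_, ?_, ?_, ?_, ?_, ?_, ?_, ?_, ?_⟩
      · rw [PySem.Dict.keys_insert_of_not_contains _ _ (PySem.Dict.contains_empty _)]
        simp [PySem.Dict.keys_empty, pvNode]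
      · simp [PySem.Set.add, PySem.Set.empty, pvNode]
      · simp
      · intro e he
        simp only [List.nil_append, List.mem_singleton] at he
        subst he
        exact PySem.Dict.get?_insert_self _ _ _
      · intro e he
        simp only [List.nil_append, List.mem_singleton] at he
        subst he
        exact ⟨le_refl _, h0⟩
      · intro e he _
        simp only [List.nil_append, List.mem_singleton] at he
        subst he
        rfl
      · intro e he
        simp only [List.nil_append, List.mem_singleton] at he
        subst he
        exact PathOf.base (PySem.Dict.get?_insert_self _ _ _)
      · intro e he x hx
        simp only [List.nil_append, List.mem_singleton] at he
        subst he
        have hx' : x ∈ ([] : List Int) ++ [source] := hx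
        simp only [List.nil_append, List.mem_singleton] at hx'
        subst hx'
        simp [pvNode]
      · intro e he
        simp only [List.nil_append, List.mem_singleton] at he
        subst he
        simp [pvEnts]
      · intro x hx
        simp only [List.nil_append] at hx
        left
        simpa [pvNode] using hx
    have hM0 : pvMeas graph [(source, -1)] (([] ++ [((source:Int), (0:Int), ([]:List Int), ([]:List Int))]).map pvNode)
        ≤ pvPairs graph + 2 := by
      have h1 := Finset.card_le_card (Finset.sdiff_subset
        (s := (pvTargets graph).toFinset) (t := ([((source:Int), (0:Int), ([]:List Int), ([]:List Int))].map pvNode).toFinset))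
      have h2 := List.toFinset_card_le (pvTargets graph)
      have h3 := pvTargets_length graph
      simp only [pvMeas, List.length_cons, List.length_nil, List.nil_append] at *
      omega
    have := loop_sim graph source nbd hpre (pvPairs graph + 2)
      ((PySem.Dict.empty (κ := Int) (ν := Int)).insert source 1)
      ((PySem.Dict.empty (κ := Int) (ν := Int)).insert source 0)
      ((PySem.Dict.empty (κ := Int) (ν := Int × Int)).insert source (-1, -1))
      PySem.Dict.empty [(source, -1)] (PySem.Set.add PySem.Set.empty source)
      [(source, 0, [], [])] [] hinv0 hM0
    rw [show pvOut nbd [] = [] from rfl] at this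
    simp only [bfs, bfs_alt, if_neg hneg]
    exact this
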